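-- pv_equiv track=rewrite | github.com/shohei-kojima/Filo_Paramyxo_2023 | scripts/Filo.py | motif_formatter
-- ===== SOURCE A (Python) =====
-- def motif_formatter(seq, pos_set, poss, back):
--     tmp=[]
--     for p in poss:
--         if p in pos_set:
--             if p + 18 - back == 0:
--                 motif=seq[p - back:]
--             else:
--                 motif=seq[p - back:p + 18 - back]
--             tmp2=[]
--             for n,c in enumerate(motif):
--                 if (n > 0) and (n % 6 == 0):
--                     tmp2.append(' ')
--                 tmp2.append(c)
--             tmp.append(''.join(tmp2))
--         else:
--             tmp.append('')
--     return '\t'.join(tmp).replace('T', 'U')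
-- ===== SOURCE B (Python) =====
-- def motif_formatter(seq, pos_set, poss, back):
--     members = set(pos_set)
--
--     def spaced(m):
--         return m if len(m) <= 6 else m[:6] + ' ' + spaced(m[6:])
--
--     return '\t'.join(
--         spaced(seq[p - back:(p + 18 - back) or None]) if p in members else ''
--         for p in poss
--     ).replace('T', 'U')
-- ===== Notes on version B (the rewrite author's own statement) =====
-- stated objective: simpler
-- what changed: The per-character enumerate loop that counts indices to insert a space every 6 characters is replaced by structural recursion on the motif (emit 6-char chunk, recurse on the rest); the two-branch substring extraction collapses into one slice with an 'or None' stop, membership uses a prebuilt set, and the tab-joined row is built by a generator expression instead of an accumulator list.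
import Mathlib
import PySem

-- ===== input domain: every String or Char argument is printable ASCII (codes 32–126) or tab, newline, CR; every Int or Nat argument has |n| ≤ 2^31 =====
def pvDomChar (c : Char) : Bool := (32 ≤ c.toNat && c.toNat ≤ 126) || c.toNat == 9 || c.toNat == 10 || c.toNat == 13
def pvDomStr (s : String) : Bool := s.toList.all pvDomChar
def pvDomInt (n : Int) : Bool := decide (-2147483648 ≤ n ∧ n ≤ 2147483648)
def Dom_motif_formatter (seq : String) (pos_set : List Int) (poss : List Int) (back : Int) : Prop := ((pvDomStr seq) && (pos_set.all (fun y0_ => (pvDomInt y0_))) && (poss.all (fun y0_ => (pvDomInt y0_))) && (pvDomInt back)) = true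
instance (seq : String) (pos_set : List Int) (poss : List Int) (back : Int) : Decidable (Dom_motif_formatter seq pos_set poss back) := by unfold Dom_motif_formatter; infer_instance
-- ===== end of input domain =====

-- B replaces A's per-character index-counting loop by structural recursion on the
-- motif in 6-char chunks and a single-slice extraction (objective: simpler).
-- ===== PORT A =====
-- loop body of A's inner 'for n,c in enumerate(motif)': optionally append ' ', then append c
def pvBodyA (t2 : List Char) (nc : Int × Char) : List Char :=
  (if nc.1 > 0 ∧ PySem.Int.mod nc.1 6 = 0 then t2 ++ [' '] else t2) ++ [nc.2]

def motif_formatter (seq : String) (pos_set : List Int) (poss : List Int) (back : Int) : String :=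
  String.ofList (PySem.Chars.replace
    (PySem.Chars.join ['\t']
      (poss.foldl (fun tmp p =>
        tmp ++ [ if p ∈ pos_set then
            List.foldl pvBodyA []
              (PySem.List.enumerate (if p + 18 - back = 0
                 then PySem.List.slice seq.toList (some (p - back)) none
                 else PySem.List.slice seq.toList (some (p - back)) (some (p + 18 - back))))
          else [] ]) ([] : List (List Char))))
    ['T'] ['U'])

-- ===== PORT B =====
-- Source B's spaced(m): m if len(m) <= 6 else m[:6] + ' ' + spaced(m[6:])
-- (m[:6] / m[6:] with nonnegative literal bounds are exactly take 6 / drop 6)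
def pvSpaced (m : List Char) : List Char :=
  if m.length ≤ 6 then m
  else m.take 6 ++ [' '] ++ pvSpaced (m.drop 6)
termination_by m.length
decreasing_by simp; omega

def motif_formatter_alt (seq : String) (pos_set : List Int) (poss : List Int) (back : Int) : String :=
  String.ofList (PySem.Chars.replace
    (PySem.Chars.join ['\t'] (poss.map (fun p =>
      if p ∈ PySem.Set.ofList pos_set then
        pvSpaced (PySem.List.slice seq.toList (some (p - back))
          (if p + 18 - back = 0 then none else some (p + 18 - back)))
      else [])))
    ['T'] ['U'])

-- ===== PRECONDITION & SPEC =====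
def Spec_motif_formatter (seq : String) (pos_set : List Int) (poss : List Int) (back : Int) (out : String) : Prop := out = motif_formatter_alt seq pos_set poss back
instance (seq : String) (pos_set : List Int) (poss : List Int) (back : Int) (out : String) : Decidable (Spec_motif_formatter seq pos_set poss back out) := by unfold Spec_motif_formatter; infer_instance

-- ===== CLAIM (what is proved, stated in full; the proofs are below) =====
def Claim_equal_motif_formatter : Prop := ∀ (seq : String) (pos_set : List Int) (poss : List Int) (back : Int), Dom_motif_formatter seq pos_set poss back → Spec_motif_formatter seq pos_set poss back (motif_formatter seq pos_set poss back)

-- ===== LEMMAS AND PROOFS =====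
-- one step of A's inner loop, as the list it appends
def pvH (nc : Int × Char) : List Char :=
  (if nc.1 > 0 ∧ PySem.Int.mod nc.1 6 = 0 then [' '] else []) ++ [nc.2]

theorem pvBodyA_eq : pvBodyA = fun acc nc => acc ++ pvH nc := by
  funext acc nc
  simp only [pvBodyA, pvH]
  split_ifs <;> simp

-- a run of characters none of whose indices is divisible by 6 gets no spaces
theorem pvRun : ∀ (t : List Char) (j : Int),
    (∀ k : Int, j ≤ k → k < j + t.length → ¬ (6:Int) ∣ k) →
    (PySem.List.enumerate t j).flatMap pvH = t := by
  intro t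
  induction t with
  | nil => intro j _; simp [PySem.List.enumerate]
  | cons a t ih =>
    intro j hnd
    simp only [PySem.List.enumerate, List.flatMap_cons]
    rw [ih (j + 1) (fun k hk1 hk2 =>
      hnd k (by omega) (by simp only [List.length_cons] at *; push_cast; omega))]
    have hno : ¬ (0 < j ∧ PySem.Int.mod j 6 = 0) := by
      rw [PySem.Int.mod_eq_zero_iff_dvd]
      intro h
      exact hnd j le_rfl (by simp only [List.length_cons]; push_cast; omega) h.2
    simp only [pvH]
    rw [if_neg hno]
    simp

-- one chunk (≤ 6 chars) starting at an index divisible by 6 contributes itself,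
-- with a leading space iff the index is positive and the chunk nonempty
theorem pvChunk (t : List Char) (j : Int) (ht : t.length ≤ 6) (h0 : 0 ≤ j)
    (hj : (6:Int) ∣ j) :
    (PySem.List.enumerate t j).flatMap pvH
      = if 0 < j ∧ t ≠ [] then ' ' :: t else t := by
  cases t with
  | nil => simp [PySem.List.enumerate]
  | cons a t' =>
    have ht' : t'.length ≤ 5 := by simp at ht; omega
    simp only [PySem.List.enumerate, List.flatMap_cons]
    rw [pvRun t' (j + 1) (fun k hk1 hk2 h6 => by omega)]
    by_cases hj0 : 0 < j
    · have hcond : 0 < j ∧ PySem.Int.mod j 6 = 0 :=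
        ⟨hj0, (PySem.Int.mod_eq_zero_iff_dvd j 6).mpr hj⟩
      simp only [pvH]
      rw [if_pos hcond, if_pos (⟨hj0, by simp⟩ : 0 < j ∧ a :: t' ≠ [])]
      simp
    · have hjz : j = 0 := by omega
      simp [pvH, hjz]

theorem pvSpaceAux : ∀ (n : Nat) (m : List Char), m.length ≤ n → ∀ j : Int, 0 ≤ j → (6:Int) ∣ j →
    (PySem.List.enumerate m j).flatMap pvH
      = if 0 < j ∧ m ≠ [] then ' ' :: pvSpaced m else pvSpaced m := by
  intro n
  induction n with
  | zero =>
    intro m hm j _ _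
    have : m = [] := List.eq_nil_of_length_eq_zero (Nat.le_zero.mp hm)
    subst this
    simp [PySem.List.enumerate, pvSpaced]
  | succ n ih =>
    intro m hm j hj0 hjd
    by_cases hle : m.length ≤ 6
    · rw [pvChunk m j hle hj0 hjd, pvSpaced, if_pos hle]
    · have hm6 : 6 < m.length := by omega
      have hm0 : m ≠ [] := by intro h; rw [h] at hm6; simp at hm6
      have hT : (m.take 6).length = 6 := by simp; omega
      have hsplit : PySem.List.enumerate m j
          = PySem.List.enumerate (m.take 6) j
              ++ PySem.List.enumerate (m.drop 6) (j + 6) := by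
        conv_lhs => rw [← List.take_append_drop 6 m]
        rw [PySem.List.enumerate_append, hT]
        norm_num
      have hd : m.drop 6 ≠ [] := by
        simp [List.drop_eq_nil_iff]; omega
      have ht : m.take 6 ≠ [] := by
        intro h; rw [h] at hT; simp at hT
      rw [hsplit, List.flatMap_append,
        pvChunk (m.take 6) j (le_of_eq hT) hj0 hjd,
        ih (m.drop 6) (by simp; omega) (j + 6) (by omega) (by omega),
        if_pos (⟨by omega, hd⟩ : 0 < j + 6 ∧ m.drop 6 ≠ [])]
      have hS : pvSpaced m = m.take 6 ++ [' '] ++ pvSpaced (m.drop 6) := by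
        rw [pvSpaced, if_neg hle]
      rw [hS]
      split_ifs with h1 h2 <;> simp_all

theorem pvFoldA_eq (m : List Char) :
    List.foldl pvBodyA [] (PySem.List.enumerate m) = pvSpaced m := by
  rw [pvBodyA_eq, PySem.List.foldl_append_eq_flatMap]
  have := pvSpaceAux m.length m le_rfl 0 le_rfl ⟨0, by ring⟩
  simpa using this

-- ===== VERDICT (by name: the statement is the Claim_ definition above) =====
theorem motif_formatter_spec : Claim_equal_motif_formatter := by
  intro seq pos_set poss back _
  unfold Spec_motif_formatter motif_formatter motif_formatter_alt
  rw [PySem.List.foldl_append_singleton_eq_map, List.nil_append]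
  refine congrArg (fun x =>
    String.ofList (PySem.Chars.replace (PySem.Chars.join ['\t'] x) ['T'] ['U'])) ?_
  apply List.map_congr_left
  intro p _
  by_cases hmem : p ∈ pos_set
  · rw [if_pos hmem, if_pos ((PySem.Set.mem_ofList pos_set p).mpr hmem)]
    by_cases hc : p + 18 - back = 0
    · rw [if_pos hc, if_pos hc, pvFoldA_eq]
    · rw [if_neg hc, if_neg hc, pvFoldA_eq]
  · rw [if_neg hmem, if_neg (fun h => hmem ((PySem.Set.mem_ofList pos_set p).mp h))]
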